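-- pv_equiv track=rewrite | github.com/dragonskies/fix-fixer | V2/fixfixer_marketdata.py | ParseUnitOfWorkPublisher
-- ===== SOURCE A (Python) =====
-- def ParseUnitOfWorkPublisher(message):
-- 	"""Handle 'Unit of Work Publisher' messages."""
-- 	newStr = ''
-- 	inQuotes = False
-- 	for char in message:
-- 		if inQuotes:
-- 			if char == '"':
-- 				inQuotes = False
-- 			else:
-- 				newStr = newStr + char
-- 		else:
-- 			if char == '"':
-- 				inQuotes = True
-- 			elif char == '[':
-- 				pass
-- 			elif char == ']':
-- 				pass
-- 			elif char == ' ':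
-- 				newStr = newStr + '|'
-- 			else:
-- 				newStr = newStr + char
-- 	return newStr
-- ===== SOURCE B (Python) =====
-- _TABLE = str.maketrans({'[': None, ']': None, ' ': '|'})
--
-- def ParseUnitOfWorkPublisher(message):
-- 	"""Handle 'Unit of Work Publisher' messages."""
-- 	parts = []
-- 	for i, seg in enumerate(message.split('"')):
-- 		parts.append(seg.translate(_TABLE) if i % 2 == 0 else seg)
-- 	return ''.join(parts)
-- ===== Notes on version B (the rewrite author's own statement) =====
-- stated objective: faster
-- what changed: Replaces the char-by-char inQuotes state machine with quadratic string concatenation by splitting on the quote character into segments whose index parity says quoted/unquoted, translating even (unquoted) segments with a translation table and joining once.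
import Mathlib
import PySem

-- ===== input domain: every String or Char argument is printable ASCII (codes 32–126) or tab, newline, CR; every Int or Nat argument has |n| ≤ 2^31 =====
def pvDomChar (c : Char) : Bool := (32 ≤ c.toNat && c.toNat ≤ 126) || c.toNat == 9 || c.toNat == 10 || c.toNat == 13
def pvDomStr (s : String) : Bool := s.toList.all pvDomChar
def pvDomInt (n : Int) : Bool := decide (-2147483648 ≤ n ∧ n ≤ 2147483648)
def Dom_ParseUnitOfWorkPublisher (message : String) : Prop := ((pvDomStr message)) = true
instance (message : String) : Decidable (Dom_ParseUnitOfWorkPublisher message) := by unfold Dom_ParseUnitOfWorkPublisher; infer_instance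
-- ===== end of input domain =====

-- B replaces A's char-by-char inQuotes state machine by split-on-'"' with index-parity
-- deciding which segments get the [/]-dropping, space→'|' translation, avoiding A's repeated concatenation (measured faster).

-- ===== PORT A =====
-- the for-loop over the characters, carrying (newStr, inQuotes)
def pvLoopA : List Char → List Char → Bool → List Char
  | [], acc, _ => acc
  | c :: cs, acc, inQuotes =>
    if inQuotes then
      if c = '"' then pvLoopA cs acc false
      else pvLoopA cs (acc ++ [c]) true
    else
      if c = '"' then pvLoopA cs acc true
      else if c = '[' then pvLoopA cs acc false
      else if c = ']' then pvLoopA cs acc false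
      else if c = ' ' then pvLoopA cs (acc ++ ['|']) false
      else pvLoopA cs (acc ++ [c]) false

def ParseUnitOfWorkPublisher (message : String) : String :=
  String.ofList (pvLoopA message.toList [] false)

-- ===== PORT B =====
-- message.split('"') at the character level
def pvSplitQ : List Char → List (List Char)
  | [] => [[]]
  | c :: cs =>
    if c = '"' then [] :: pvSplitQ cs
    else
      match pvSplitQ cs with
      | s :: ss => (c :: s) :: ss
      | [] => [[c]]

-- seg.translate(_TABLE): drop '[' and ']', map ' ' to '|'
def pvTranslate (s : List Char) : List Char :=
  s.flatMap fun c =>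
    if c = '[' ∨ c = ']' then [] else if c = ' ' then ['|'] else [c]

def ParseUnitOfWorkPublisher_alt (message : String) : String :=
  String.ofList
    ((((pvSplitQ message.toList).zipIdx).map
        (fun p => if p.2 % 2 == 0 then pvTranslate p.1 else p.1)).flatten)

-- ===== PRECONDITION & SPEC =====
def Spec_ParseUnitOfWorkPublisher (message : String) (out : String) : Prop := out = ParseUnitOfWorkPublisher_alt message
instance (message : String) (out : String) : Decidable (Spec_ParseUnitOfWorkPublisher message out) := by unfold Spec_ParseUnitOfWorkPublisher; infer_instance

-- ===== CLAIM (what is proved, stated in full; the proofs are below) =====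
def Claim_equal_ParseUnitOfWorkPublisher : Prop := ∀ (message : String), Dom_ParseUnitOfWorkPublisher message → Spec_ParseUnitOfWorkPublisher message (ParseUnitOfWorkPublisher message)

-- ===== LEMMAS AND PROOFS =====

-- reference spec: two-mode recursion (mode = inQuotes)
def pvS : Bool → List Char → List Char
  | _, [] => []
  | true, c :: cs => if c = '"' then pvS false cs else c :: pvS true cs
  | false, c :: cs =>
    if c = '"' then pvS true cs
    else if c = '[' ∨ c = ']' then pvS false cs
    else if c = ' ' then '|' :: pvS false cs
    else c :: pvS false cs

-- alternate-parity join of segments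
def pvAltJoin : Bool → List (List Char) → List Char
  | _, [] => []
  | true, s :: ss => pvTranslate s ++ pvAltJoin false ss
  | false, s :: ss => s ++ pvAltJoin true ss

theorem pvLoopA_eq_S (cs : List Char) : ∀ acc q, pvLoopA cs acc q = acc ++ pvS q cs := by
  induction cs with
  | nil => intro acc q; cases q <;> simp [pvLoopA, pvS]
  | cons c cs ih =>
    intro acc q
    cases q <;> simp only [pvLoopA, pvS] <;> split_ifs <;>
      simp_all [List.append_assoc]

theorem pvSplitQ_ne_nil (cs : List Char) : pvSplitQ cs ≠ [] := by
  cases cs with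
  | nil => simp [pvSplitQ]
  | cons c cs =>
    simp only [pvSplitQ]
    split_ifs
    · simp
    · cases h : pvSplitQ cs <;> simp

theorem pvTranslate_cons (c : Char) (s : List Char) :
    pvTranslate (c :: s)
      = (if c = '[' ∨ c = ']' then [] else if c = ' ' then ['|'] else [c]) ++ pvTranslate s := by
  simp [pvTranslate]

theorem pvAltJoin_splitQ (cs : List Char) : ∀ q, pvAltJoin (!q) (pvSplitQ cs) = pvS q cs := by
  induction cs with
  | nil => intro q; cases q <;> simp [pvSplitQ, pvAltJoin, pvS, pvTranslate]
  | cons c cs ih =>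
    intro q
    by_cases h1 : c = '"'
    · subst h1
      cases q
      · simpa [pvSplitQ, pvAltJoin, pvS, pvTranslate] using ih true
      · simpa [pvSplitQ, pvAltJoin, pvS, pvTranslate] using ih false
    · obtain ⟨s, ss, hss⟩ : ∃ s ss, pvSplitQ cs = s :: ss := by
        cases h : pvSplitQ cs with
        | nil => exact absurd h (pvSplitQ_ne_nil cs)
        | cons s ss => exact ⟨s, ss, rfl⟩
      have hs : pvSplitQ (c :: cs) = (c :: s) :: ss := by simp [pvSplitQ, h1, hss]
      cases q
      · have hrec : pvTranslate s ++ pvAltJoin false ss = pvS false cs := by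
          simpa [hss, pvAltJoin] using ih false
        rw [show (!false) = true from rfl, hs]
        simp only [pvAltJoin, pvTranslate_cons, List.append_assoc, hrec, pvS]
        split_ifs <;> simp_all
      · have hrec : s ++ pvAltJoin true ss = pvS true cs := by
          simpa [hss, pvAltJoin] using ih true
        rw [show (!true) = false from rfl, hs]
        simp only [pvAltJoin, List.cons_append, hrec, pvS]
        simp [h1]

theorem pvFlatten_zipIdx (ss : List (List Char)) :
    ∀ k, (((ss.zipIdx k).map
        (fun p => if p.2 % 2 == 0 then pvTranslate p.1 else p.1)).flatten)
      = pvAltJoin (k % 2 == 0) ss := by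
  induction ss with
  | nil => intro k; simp [pvAltJoin]
  | cons s ss ih =>
    intro k
    have h1 := ih (k + 1)
    simp only [List.zipIdx_cons, List.map_cons, List.flatten_cons, h1]
    rcases Nat.even_or_odd k with h | h
    · have hk : k % 2 = 0 := Nat.even_iff.mp h
      have hk1 : (k + 1) % 2 = 1 := by omega
      simp [hk, hk1, pvAltJoin]
    · have hk : k % 2 = 1 := Nat.odd_iff.mp h
      have hk1 : (k + 1) % 2 = 0 := by omega
      simp [hk, hk1, pvAltJoin]

-- ===== VERDICT (by name: the statement is the Claim_ definition above) =====
theorem ParseUnitOfWorkPublisher_spec : Claim_equal_ParseUnitOfWorkPublisher := by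
  intro message _
  unfold Spec_ParseUnitOfWorkPublisher ParseUnitOfWorkPublisher ParseUnitOfWorkPublisher_alt
  rw [pvLoopA_eq_S, pvFlatten_zipIdx]
  have := pvAltJoin_splitQ message.toList false
  simp_all
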